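-- pv_equiv track=rewrite | github.com/MWest2020/Ops_to_Biz | audit/local_report.py | _groepeer_per_clausule
-- ===== SOURCE A (Python) =====
-- from collections import defaultdict
--
-- VOLGORDE = {"NC": 0, "OFI": 1, "positief": 2}
--
-- def _groepeer_per_clausule(bevindingen: list[dict]) -> dict[str, list[dict]]:
--     per_clausule: dict[str, list[dict]] = defaultdict(list)
--     for bev in bevindingen:
--         per_clausule[bev["clausule"]].append(bev)
--     return {
--         k: sorted(v, key=lambda b: VOLGORDE.get(b["classificatie"], 9))
--         for k, v in sorted(per_clausule.items())
--     }
-- ===== SOURCE B (Python) =====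
-- VOLGORDE = {"NC": 0, "OFI": 1, "positief": 2}
--
-- def _groepeer_per_clausule(bevindingen):
--     # Different decomposition: collect the distinct clauses and sort them once,
--     # then build each group by bucket passes per rank value (0, 1, 2, 9) --
--     # a counting-sort-style grouping with no comparison sort of findings at all.
--     clauses = sorted({bev["clausule"] for bev in bevindingen})
--     return {
--         c: [bev for r in (0, 1, 2, 9)
--             for bev in bevindingen
--             if bev["clausule"] == c and VOLGORDE.get(bev["classificatie"], 9) == r]
--         for c in clauses
--     }
-- ===== Notes on version B (the rewrite author's own statement) =====
-- stated objective: alternative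
-- what changed: A groups into a defaultdict and then sorts the key list and comparison-sorts every group; B sorts only the distinct clause set once and builds each group by bucket passes over the input per rank value (0,1,2,9), so no comparison sort of findings remains.
import Mathlib
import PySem

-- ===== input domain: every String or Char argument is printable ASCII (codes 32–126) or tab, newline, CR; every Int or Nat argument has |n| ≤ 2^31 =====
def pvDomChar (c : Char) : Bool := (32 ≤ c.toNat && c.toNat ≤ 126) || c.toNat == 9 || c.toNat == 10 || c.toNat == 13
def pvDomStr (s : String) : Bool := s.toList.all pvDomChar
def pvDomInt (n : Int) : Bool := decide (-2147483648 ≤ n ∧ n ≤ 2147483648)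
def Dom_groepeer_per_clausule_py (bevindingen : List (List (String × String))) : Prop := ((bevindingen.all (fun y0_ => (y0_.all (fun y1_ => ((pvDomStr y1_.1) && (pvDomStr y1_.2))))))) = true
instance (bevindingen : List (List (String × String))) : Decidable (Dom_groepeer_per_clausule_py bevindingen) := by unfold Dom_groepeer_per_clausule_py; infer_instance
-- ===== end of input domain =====

-- B sorts the distinct clause set once and builds each group by bucket passes per rank
-- value (0,1,2,9) instead of A's group-then-sort-keys-and-each-group (objective: alternative).

-- ===== PORT A =====
-- VOLGORDE.get(c, 9)
def pvVolg (c : String) : Int :=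
  if c == "NC" then 0 else if c == "OFI" then 1 else if c == "positief" then 2 else 9
-- bev["clausule"] / bev["classificatie"]; '.getD ""' is only reached where Python raises
-- KeyError, and Pre_ excludes exactly those inputs.
def pvClause (bev : List (String × String)) : String :=
  ((PySem.Dict.mk bev).get? "clausule").getD ""
def pvKlas (bev : List (String × String)) : String :=
  ((PySem.Dict.mk bev).get? "classificatie").getD ""

def groepeer_per_clausule_py (bevindingen : List (List (String × String))) : List (String × List (List (String × String))) :=
  -- per_clausule[bev["clausule"]].append(bev) over a defaultdict(list)
  -- sorted(per_clausule.items()): dict keys are distinct, so Python's tuple comparison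
  -- only ever compares the keys — sorting by the first component is exact.
  (PySem.List.sorted
      (bevindingen.foldl (fun d bev => d.modify (pvClause bev) [] (fun v => v ++ [bev]))
        (PySem.Dict.empty : PySem.Dict String (List (List (String × String))))).items
      (fun p => p.1) false).map
    (fun p => (p.1, PySem.List.sorted p.2 (fun b => pvVolg (pvKlas b)) false))

-- ===== PORT B =====
def groepeer_per_clausule_py_alt (bevindingen : List (List (String × String))) : List (String × List (List (String × String))) :=
  -- clauses = sorted({bev["clausule"] for bev in bevindingen})
  -- {c: [bev for r in (0,1,2,9) for bev in bevindingen
  --      if bev["clausule"] == c and VOLGORDE.get(bev["classificatie"], 9) == r] for c in clauses}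
  (PySem.List.sorted (PySem.Set.ofList (bevindingen.map (fun bev => pvClause bev))) (fun k => k) false).map
    (fun c => (c, ([0, 1, 2, 9] : List Int).flatMap (fun r =>
        bevindingen.filter (fun bev => pvClause bev == c && pvVolg (pvKlas bev) == r))))

-- ===== PRECONDITION & SPEC =====
-- Pre_ excludes (a) findings missing the key "clausule" or "classificatie" — there Python A
-- raises KeyError — and (b) association lists with a duplicated key inside one finding, which
-- do not represent any Python dict (a real dict argument has already deduplicated its keys).
def Pre_groepeer_per_clausule_py (bevindingen : List (List (String × String))) : Prop :=
  ∀ bev ∈ bevindingen, "clausule" ∈ bev.map Prod.fst ∧ "classificatie" ∈ bev.map Prod.fst ∧ (bev.map Prod.fst).Nodup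
instance (bevindingen : List (List (String × String))) : Decidable (Pre_groepeer_per_clausule_py bevindingen) := by unfold Pre_groepeer_per_clausule_py; infer_instance

def pvWitness_groepeer_per_clausule_py : (List (List (String × String))) :=
  [[("clausule", "9.1"), ("classificatie", "NC")], [("clausule", "4.2"), ("classificatie", "positief")]]

def Spec_groepeer_per_clausule_py (bevindingen : List (List (String × String))) (out : List (String × List (List (String × String)))) : Prop := out = groepeer_per_clausule_py_alt bevindingen
instance (bevindingen : List (List (String × String))) (out : List (String × List (List (String × String)))) : Decidable (Spec_groepeer_per_clausule_py bevindingen out) := by unfold Spec_groepeer_per_clausule_py; infer_instance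

-- ===== CLAIM (what is proved, stated in full; the proofs are below) =====
def Claim_equal_groepeer_per_clausule_py : Prop := ∀ (bevindingen : List (List (String × String))), Dom_groepeer_per_clausule_py bevindingen → Pre_groepeer_per_clausule_py bevindingen → Spec_groepeer_per_clausule_py bevindingen (groepeer_per_clausule_py bevindingen)

-- ===== LEMMAS AND PROOFS =====

-- the rank key both sorts use, and the comparator of A's per-group insertion sort
def pvKey (b : List (String × String)) : Int := pvVolg (pvKlas b)
def pvBf (a b : List (String × String)) : Bool := decide (pvKey a < pvKey b)
-- the bucket decomposition B builds per clause-group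
def pvBk (v : List (List (String × String))) : List (List (String × String)) :=
  ([0, 1, 2, 9] : List Int).flatMap (fun r => v.filter (fun b => pvKey b == r))

lemma pvKey_cases (b : List (String × String)) :
    pvKey b = 0 ∨ pvKey b = 1 ∨ pvKey b = 2 ∨ pvKey b = 9 := by
  unfold pvKey pvVolg; split_ifs <;> simp

lemma pv_insertBy_cons (bf : List (String × String) → List (String × String) → Bool)
    (x y : List (String × String)) (ys : List (List (String × String))) :
    PySem.List.insertBy bf x (y :: ys) =
      if bf x y then x :: y :: ys else y :: PySem.List.insertBy bf x ys := rfl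

-- an element inserts exactly at the end of the ≤-region
lemma pv_insert_split (x : List (String × String)) (l1 l2 : List (List (String × String)))
    (h1 : ∀ y ∈ l1, ¬ pvKey x < pvKey y) (h2 : ∀ y ∈ l2, pvKey x < pvKey y) :
    PySem.List.insertBy pvBf x (l1 ++ l2) = l1 ++ x :: l2 := by
  induction l1 with
  | nil =>
    cases l2 with
    | nil => rfl
    | cons y ys =>
      simp only [List.nil_append, pv_insertBy_cons]
      rw [if_pos (by exact decide_eq_true (h2 y (List.mem_cons_self)))]
  | cons y ys ih =>
    simp only [List.cons_append, pv_insertBy_cons]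
    rw [if_neg (by simpa [pvBf] using h1 y (List.mem_cons_self)),
      ih (fun z hz => h1 z (List.mem_cons_of_mem y hz))]

lemma pv_filter_append_singleton (r : Int) (v : List (List (String × String))) (x : List (String × String)) :
    (v ++ [x]).filter (fun b => pvKey b == r) =
      v.filter (fun b => pvKey b == r) ++ if pvKey x == r then [x] else [] := by
  rw [List.filter_append]
  cases h : pvKey x == r <;> simp [List.filter, h]

lemma pv_mem_filter_key {r : Int} {v : List (List (String × String))} {y : List (String × String)}
    (hy : y ∈ v.filter (fun b => pvKey b == r)) : pvKey y = r := by
  have := (List.mem_filter.mp hy).2; simpa using this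

lemma pvBk_expand (v : List (List (String × String))) :
    pvBk v = v.filter (fun b => pvKey b == 0) ++ (v.filter (fun b => pvKey b == 1) ++
      (v.filter (fun b => pvKey b == 2) ++ v.filter (fun b => pvKey b == 9))) := by
  simp [pvBk, List.flatMap]

lemma pv_insert_bucket (x : List (String × String)) (v : List (List (String × String))) :
    PySem.List.insertBy pvBf x (pvBk v) = pvBk (v ++ [x]) := by
  rw [pvBk_expand, pvBk_expand, pv_filter_append_singleton, pv_filter_append_singleton,
    pv_filter_append_singleton, pv_filter_append_singleton]
  set f0 := v.filter (fun b => pvKey b == (0 : Int)) with hf0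
  set f1 := v.filter (fun b => pvKey b == (1 : Int)) with hf1
  set f2 := v.filter (fun b => pvKey b == (2 : Int)) with hf2
  set f9 := v.filter (fun b => pvKey b == (9 : Int)) with hf9
  have m0 : ∀ y ∈ f0, pvKey y = 0 := fun y hy => pv_mem_filter_key (hf0 ▸ hy)
  have m1 : ∀ y ∈ f1, pvKey y = 1 := fun y hy => pv_mem_filter_key (hf1 ▸ hy)
  have m2 : ∀ y ∈ f2, pvKey y = 2 := fun y hy => pv_mem_filter_key (hf2 ▸ hy)
  have m9 : ∀ y ∈ f9, pvKey y = 9 := fun y hy => pv_mem_filter_key (hf9 ▸ hy)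
  rcases pvKey_cases x with hx | hx | hx | hx
  · rw [if_pos (by simp [hx]), if_neg (by simp [hx]), if_neg (by simp [hx]), if_neg (by simp [hx]),
      pv_insert_split x f0 (f1 ++ (f2 ++ f9))
        (fun y hy => by have := m0 y hy; omega)
        (fun y hy => by
          simp only [List.mem_append] at hy
          rcases hy with hy | hy | hy
          · have := m1 y hy; omega
          · have := m2 y hy; omega
          · have := m9 y hy; omega)]
    simp
  · rw [if_neg (by simp [hx]), if_pos (by simp [hx]), if_neg (by simp [hx]), if_neg (by simp [hx]),
      show f0 ++ (f1 ++ (f2 ++ f9)) = (f0 ++ f1) ++ (f2 ++ f9) by simp,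
      pv_insert_split x (f0 ++ f1) (f2 ++ f9)
        (fun y hy => by
          simp only [List.mem_append] at hy
          rcases hy with hy | hy
          · have := m0 y hy; omega
          · have := m1 y hy; omega)
        (fun y hy => by
          simp only [List.mem_append] at hy
          rcases hy with hy | hy
          · have := m2 y hy; omega
          · have := m9 y hy; omega)]
    simp
  · rw [if_neg (by simp [hx]), if_neg (by simp [hx]), if_pos (by simp [hx]), if_neg (by simp [hx]),
      show f0 ++ (f1 ++ (f2 ++ f9)) = ((f0 ++ f1) ++ f2) ++ f9 by simp,
      pv_insert_split x ((f0 ++ f1) ++ f2) f9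
        (fun y hy => by
          simp only [List.mem_append] at hy
          rcases hy with (hy | hy) | hy
          · have := m0 y hy; omega
          · have := m1 y hy; omega
          · have := m2 y hy; omega)
        (fun y hy => by have := m9 y hy; omega)]
    simp
  · rw [if_neg (by simp [hx]), if_neg (by simp [hx]), if_neg (by simp [hx]), if_pos (by simp [hx]),
      show f0 ++ (f1 ++ (f2 ++ f9)) = (((f0 ++ f1) ++ f2) ++ f9) ++ [] by simp,
      pv_insert_split x (((f0 ++ f1) ++ f2) ++ f9) []
        (fun y hy => by
          simp only [List.mem_append] at hy
          rcases hy with ((hy | hy) | hy) | hy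
          · have := m0 y hy; omega
          · have := m1 y hy; omega
          · have := m2 y hy; omega
          · have := m9 y hy; omega)
        (fun y hy => by simp at hy)]
    simp

lemma pv_foldl_bucket (xs v : List (List (String × String))) :
    xs.foldl (fun acc x => PySem.List.insertBy pvBf x acc) (pvBk v) = pvBk (v ++ xs) := by
  induction xs generalizing v with
  | nil => simp
  | cons x xs ih =>
    simp only [List.foldl_cons]
    rw [pv_insert_bucket, ih]
    simp

lemma pv_sorted_bucket (v : List (List (String × String))) :
    PySem.List.sorted v (fun b => pvVolg (pvKlas b)) false = pvBk v := by
  rw [PySem.List.sorted_eq_foldl_insertBy]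
  have h0 : pvBk ([] : List (List (String × String))) = [] := by simp [pvBk]
  have := pv_foldl_bucket v []
  simp only [List.nil_append] at this
  rw [← h0] at this ⊢
  exact this

lemma pv_group_items (xs : List (List (String × String))) :
    (xs.foldl (fun d bev => d.modify (pvClause bev) [] (fun v => v ++ [bev]))
        (PySem.Dict.empty : PySem.Dict String (List (List (String × String))))).items =
      (PySem.Set.ofList (xs.map pvClause)).map (fun k => (k, xs.filter (fun b => pvClause b == k))) := by
  set d := xs.foldl (fun d bev => d.modify (pvClause bev) [] (fun v => v ++ [bev]))
      (PySem.Dict.empty : PySem.Dict String (List (List (String × String)))) with hd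
  have hnd : d.keys.Nodup := by
    rw [hd]
    exact PySem.Dict.nodup_keys_foldl_modify_key xs pvClause [] (fun _ bev v => v ++ [bev]) _
      PySem.Dict.nodup_keys_empty
  have hkeys : d.keys = PySem.Set.ofList (xs.map pvClause) := by
    rw [hd]
    rw [PySem.Dict.keys_foldl_modify_key xs pvClause [] (fun _ bev v => v ++ [bev]) _]
    rfl
  have hget : ∀ k, d.getD k [] = xs.filter (fun b => pvClause b == k) := by
    intro k
    rw [hd]
    have hmap : xs.foldl (fun d bev => d.modify (pvClause bev) [] (fun v => v ++ [bev]))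
        (PySem.Dict.empty : PySem.Dict String (List (List (String × String)))) =
        (xs.map (fun b => (pvClause b, b))).foldl
          (fun d p => d.modify p.1 [] (fun v => v ++ [p.2])) PySem.Dict.empty := by
      rw [List.foldl_map]
    rw [hmap, PySem.Dict.getD_foldl_modify_append]
    simp [List.filter_map, Function.comp_def]
  rw [PySem.Dict.items_eq_map_keys d hnd []]
  rw [hkeys]
  exact List.map_congr_left (fun k _ => by rw [hget k])

-- ===== VERDICT (by name: the statement is the Claim_ definition above) =====
theorem groepeer_per_clausule_py_spec : Claim_equal_groepeer_per_clausule_py := by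
  intro xs _ _
  unfold Spec_groepeer_per_clausule_py groepeer_per_clausule_py groepeer_per_clausule_py_alt
  rw [pv_group_items]
  -- A side: sorting the grouped items by key is mapping over the sorted key set
  have hsort :
      PySem.List.sorted
          ((PySem.Set.ofList (xs.map pvClause)).map
            (fun k => (k, xs.filter (fun b => pvClause b == k)))) (fun p => p.1) false =
        (PySem.List.sorted (PySem.Set.ofList (xs.map pvClause)) (fun k => k) false).map
          (fun k => (k, xs.filter (fun b => pvClause b == k))) := by
    apply PySem.List.sorted_eq_of_perm_of_pairwise_lt
    · exact (PySem.List.sorted_perm _ _ _).map _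
    · have hlt := PySem.List.sorted_ofList_pairwise_lt (xs := xs.map pvClause)
      exact (List.pairwise_map).mpr (hlt.imp (fun {a b} h => h))
  rw [hsort, List.map_map]
  refine List.map_congr_left (fun k _ => ?_)
  simp only [Function.comp]
  rw [pv_sorted_bucket]
  unfold pvBk
  have hf : (fun r => (xs.filter (fun b => pvClause b == k)).filter (fun b => pvKey b == r)) =
      (fun r => xs.filter (fun bev => pvClause bev == k && pvVolg (pvKlas bev) == r)) := by
    funext r
    rw [List.filter_filter]
    exact List.filter_congr fun b _ => by simp [pvKey, Bool.and_comm]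
  rw [hf]
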